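-- pv_equiv track=rewrite | github.com/linuxcaffe/tw-web | app.py | _parse_preflight
-- ===== SOURCE A (Python) =====
-- _MUTATING_VERBS = {
--     'add', 'modify', 'mod', 'mo',
--     'delete', 'del', 'dele',
--     'done', 'do', 'don',
--     'start', 'sta', 'star',
--     'stop', 'sto',
--     'annotate', 'ann', 'anno',
--     'append', 'app', 'appe',
--     'prepend', 'pre', 'prep',
--     'duplicate', 'dup', 'dupl',
--     'purge', 'pur',
-- }
--
-- def _parse_preflight(args):
--     """Split user args into (filter_args, verb).  Ignores rc.xxx tokens."""
--     filter_args, verb = [], None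
--     for tok in args:
--         if tok.startswith('rc.') or tok == 'task':
--             continue
--         if verb is None and tok.lower() in _MUTATING_VERBS:
--             verb = tok.lower()
--             break
--         filter_args.append(tok)
--     return filter_args, verb
-- ===== SOURCE B (Python) =====
-- _MUTATING_VERBS = {
--     'add', 'modify', 'mod', 'mo',
--     'delete', 'del', 'dele',
--     'done', 'do', 'don',
--     'start', 'sta', 'star',
--     'stop', 'sto',
--     'annotate', 'ann', 'anno',
--     'append', 'app', 'appe',
--     'prepend', 'pre', 'prep',
--     'duplicate', 'dup', 'dupl',
--     'purge', 'pur',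
-- }
--
-- def _parse_preflight(args):
--     """Split user args into (filter_args, verb).  Ignores rc.xxx tokens."""
--     idx = next((i for i, t in enumerate(args)
--                 if not t.startswith('rc.') and t != 'task'
--                 and t.lower() in _MUTATING_VERBS), None)
--     filter_args = [t for t in args[:idx]
--                    if not t.startswith('rc.') and t != 'task']
--     verb = args[idx].lower() if idx is not None else None
--     return filter_args, verb
-- ===== Notes on version B (the rewrite author's own statement) =====
-- stated objective: alternative
-- what changed: Replaces A's fused accumulate-and-break loop with a locate-then-partition decomposition: first find the index of the first mutating verb, then filter the prefix before it and read the verb off by index.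
import Mathlib
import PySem

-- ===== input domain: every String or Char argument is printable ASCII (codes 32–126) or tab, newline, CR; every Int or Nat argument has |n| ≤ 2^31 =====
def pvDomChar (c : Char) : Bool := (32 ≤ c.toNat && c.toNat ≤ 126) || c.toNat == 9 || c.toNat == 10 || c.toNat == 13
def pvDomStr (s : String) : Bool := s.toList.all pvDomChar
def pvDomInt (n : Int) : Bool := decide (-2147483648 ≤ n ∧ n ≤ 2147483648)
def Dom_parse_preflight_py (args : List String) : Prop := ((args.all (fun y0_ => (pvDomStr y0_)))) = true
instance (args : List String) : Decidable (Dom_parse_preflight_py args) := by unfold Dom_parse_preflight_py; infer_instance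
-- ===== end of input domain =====

-- ===== PORT A =====
-- _parse_preflight: B replaces A's fused accumulate-and-break loop with locate-then-partition (same cost, different decomposition).
def pvVerbs : List String := ["add", "modify", "mod", "mo",
  "delete", "del", "dele", "done", "do", "don", "start", "sta", "star",
  "stop", "sto", "annotate", "ann", "anno", "append", "app", "appe",
  "prepend", "pre", "prep", "duplicate", "dup", "dupl", "purge", "pur"]

-- A's loop: skip rc./task tokens; on the first mutating verb, set it and break; else accumulate.
def parse_preflight_loop : List String → List String → List String × Option String
  | [], acc => (acc, none)
  | tok :: rest, acc =>
    if PySem.Str.startswith tok "rc." || tok == "task" then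
      parse_preflight_loop rest acc
    else if pvVerbs.contains (PySem.Str.lower tok) then
      (acc, some (PySem.Str.lower tok))
    else
      parse_preflight_loop rest (acc ++ [tok])

def parse_preflight_py (args : List String) : List String × Option String :=
  parse_preflight_loop args []


-- ===== PORT B =====
-- B: find the index of the first verb token, then filter the prefix and index the verb.
def pvIsVerbTok (t : String) : Bool :=
  !PySem.Str.startswith t "rc." && t != "task" && pvVerbs.contains (PySem.Str.lower t)

def pvKeepTok (t : String) : Bool :=
  !PySem.Str.startswith t "rc." && t != "task"

def parse_preflight_py_alt (args : List String) : List String × Option String :=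
  match args.findIdx? pvIsVerbTok with
  | none => (args.filter pvKeepTok, none)
  | some i => ((args.take i).filter pvKeepTok, (args[i]?).map PySem.Str.lower)


-- ===== PRECONDITION & SPEC =====
def Spec_parse_preflight_py (args : List String) (out : List String × Option String) : Prop := out = parse_preflight_py_alt args
instance (args : List String) (out : List String × Option String) : Decidable (Spec_parse_preflight_py args out) := by unfold Spec_parse_preflight_py; infer_instance

-- ===== CLAIM (what is proved, stated in full; the proofs are below) =====
def Claim_equal_parse_preflight_py : Prop := ∀ (args : List String), Dom_parse_preflight_py args → Spec_parse_preflight_py args (parse_preflight_py args)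

-- ===== LEMMAS AND PROOFS =====

-- Loop invariant: A's loop from accumulator acc equals acc ++ B's locate-then-partition result.
theorem loop_eq (args : List String) : ∀ acc : List String,
    parse_preflight_loop args acc =
      (match args.findIdx? pvIsVerbTok with
       | none => (acc ++ args.filter pvKeepTok, none)
       | some i => (acc ++ (args.take i).filter pvKeepTok, (args[i]?).map PySem.Str.lower)) := by
  induction args with
  | nil => intro acc; simp [parse_preflight_loop]
  | cons tok rest ih =>
    intro acc
    by_cases hs : PySem.Str.startswith tok "rc." = true
    · -- skipped: rc. prefix
      have hp : pvIsVerbTok tok = false := by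
        simp only [pvIsVerbTok, hs, Bool.not_true, Bool.false_and]
      have hq : pvKeepTok tok = false := by
        simp only [pvKeepTok, hs, Bool.not_true, Bool.false_and]
      have hskip : (PySem.Str.startswith tok "rc." || tok == "task") = true := by
        rw [hs]; rfl
      simp only [parse_preflight_loop, hskip, if_true, ih acc,
        List.findIdx?_cons, hp, List.filter_cons, hq, Bool.false_eq_true, if_false]
      cases rest.findIdx? pvIsVerbTok <;> simp [hq]
    · have hs' : PySem.Str.startswith tok "rc." = false := Bool.eq_false_iff.mpr hs
      by_cases ht : tok = "task"
      · -- skipped: the literal token 'task'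
        have ht' : (tok == "task") = true := beq_iff_eq.mpr ht
        have hp : pvIsVerbTok tok = false := by
          simp only [pvIsVerbTok, bne, ht', Bool.not_true, Bool.false_and, Bool.and_false]
        have hq : pvKeepTok tok = false := by
          simp only [pvKeepTok, bne, ht', Bool.not_true, Bool.and_false]
        have hskip : (PySem.Str.startswith tok "rc." || tok == "task") = true := by
          rw [ht']; simp
        simp only [parse_preflight_loop, hskip, if_true, ih acc,
          List.findIdx?_cons, hp, List.filter_cons, hq, Bool.false_eq_true, if_false]
        cases rest.findIdx? pvIsVerbTok <;> simp [hq]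
      · -- not skipped
        have ht' : (tok == "task") = false := beq_eq_false_iff_ne.mpr ht
        have hskip : (PySem.Str.startswith tok "rc." || tok == "task") = false := by
          rw [hs', ht']; rfl
        by_cases hv : pvVerbs.contains (PySem.Str.lower tok) = true
        · -- the first mutating verb: both sides stop here
          have hp : pvIsVerbTok tok = true := by
            simp only [pvIsVerbTok, bne, hs', ht', hv, Bool.not_false, Bool.and_true]
          simp only [parse_preflight_loop, hskip, Bool.false_eq_true, if_false, hv, if_true,
            List.findIdx?_cons, hp]
          simp
        · -- ordinary filter token: accumulate / keep
          have hv' : pvVerbs.contains (PySem.Str.lower tok) = false := Bool.eq_false_iff.mpr hv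
          have hp : pvIsVerbTok tok = false := by
            simp only [pvIsVerbTok, hv', Bool.and_false]
          have hq : pvKeepTok tok = true := by
            simp only [pvKeepTok, bne, hs', ht', Bool.not_false, Bool.true_and]
          simp only [parse_preflight_loop, hskip, Bool.false_eq_true, if_false, hv,
            ih (acc ++ [tok]), List.findIdx?_cons, hp, List.filter_cons, hq, if_true]
          cases rest.findIdx? pvIsVerbTok <;> simp [hq]

-- ===== VERDICT =====
theorem parse_preflight_py_spec : Claim_equal_parse_preflight_py := by
  intro args _
  unfold Spec_parse_preflight_py parse_preflight_py parse_preflight_py_alt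
  rw [loop_eq args []]
  cases args.findIdx? pvIsVerbTok <;> simp
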